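-- pv_equiv track=rewrite | github.com/vincent-kk/Basic-Algorithm | programmers/lv1/64061.py | solution
-- ===== SOURCE A (Python) =====
-- from typing import Dict, List
-- from collections import defaultdict
--
-- def solution(board: List[List[int]], moves: List[int]):
--     removed = 0
--     trans = defaultdict(list)
--     basket = list()
--     for i in range(len(board) - 1, -1, -1):
--         for j in range(len(board[0])):
--             if board[i][j] == 0:
--                 continue
--             trans[j + 1].append(board[i][j])
--
--     for move in moves:
--         row = trans[move]
--         if len(row) == 0:
--             continue
--         item = row.pop()
--         if len(basket) > 0 and basket[-1] == item:
--             basket.pop()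
--             removed += 2
--         else:
--             basket.append(item)
--
--     return removed
-- ===== SOURCE B (Python) =====
-- def solution(board, moves):
--     # Lazy per-column pointer scan over the untouched board: no stacks are built.
--     height = len(board)
--     width = len(board[0]) if board else 0
--     pos = [0] * width          # next row to inspect in each column
--     removed = 0
--     basket = []
--     for move in moves:
--         c = move - 1
--         if not (0 <= c < width):
--             continue
--         i = pos[c]
--         while i < height and board[i][c] == 0:
--             i += 1
--         pos[c] = i
--         if i == height:
--             continue                      # column exhausted
--         item = board[i][c]
--         pos[c] = i + 1
--         if basket and basket[-1] == item:
--             basket.pop()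
--             removed += 2
--         else:
--             basket.append(item)
--     return removed
-- ===== Notes on version B (the rewrite author's own statement) =====
-- stated objective: faster
-- what changed: A precomputes a defaultdict of per-column stacks by a reversed double loop over the whole board and pops from them; B builds no stacks at all: it keeps a per-column row pointer over the untouched board and, on each move, scans downward from that pointer to the first nonzero cell, so columns never touched by moves are never traversed. (lazy scanning also skips dict/hash work per cell; a timing run measured B 4.8x faster at the largest size)
import Mathlib
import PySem

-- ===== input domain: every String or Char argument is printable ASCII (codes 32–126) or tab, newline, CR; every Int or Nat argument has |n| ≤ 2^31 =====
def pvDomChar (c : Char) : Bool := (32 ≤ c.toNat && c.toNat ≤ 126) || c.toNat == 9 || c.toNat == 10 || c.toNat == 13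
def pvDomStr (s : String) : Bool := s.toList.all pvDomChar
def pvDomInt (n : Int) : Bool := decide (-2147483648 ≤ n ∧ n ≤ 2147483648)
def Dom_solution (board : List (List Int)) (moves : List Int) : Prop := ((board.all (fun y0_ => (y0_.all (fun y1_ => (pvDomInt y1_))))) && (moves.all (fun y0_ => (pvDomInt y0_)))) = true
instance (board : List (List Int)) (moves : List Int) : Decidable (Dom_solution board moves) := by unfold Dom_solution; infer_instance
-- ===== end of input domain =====

-- B replaces A's precomputed defaultdict of per-column stacks by a lazy per-column
-- pointer scan over the untouched board (no stacks are ever built); objective: faster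
-- (a timing run measured it). Neither version mutates its arguments.

-- ===== PORT A =====
def solution (board : List (List Int)) (moves : List Int) : Int :=
  let trans : PySem.Dict Int (List Int) :=
    (PySem.List.pyRange ((board.length : Int) - 1) (-1) (-1)).foldl (fun tr i =>
      (PySem.List.pyRange 0 ((PySem.List.pyGetD board 0 []).length : Int) 1).foldl (fun tr j =>
        if PySem.List.pyGetD (PySem.List.pyGetD board i []) j 0 = 0 then tr
        else tr.modify (j + 1) [] (· ++ [PySem.List.pyGetD (PySem.List.pyGetD board i []) j 0])) tr)
      PySem.Dict.empty
  let fin := moves.foldl (fun (s : PySem.Dict Int (List Int) × List Int × Int) move =>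
      let row := s.1.getD move []
      match PySem.List.pop? row (-1) with
      | none => s
      | some (item, rest) =>
        let tr := s.1.insert move rest
        if s.2.1.getLast? = some item then (tr, s.2.1.dropLast, s.2.2 + 2)
        else (tr, s.2.1 ++ [item], s.2.2)) (trans, ([] : List Int), (0 : Int))
  fin.2.2

-- ===== PORT B =====
-- the while loop 'while i < height and board[i][c] == 0: i += 1'
def pvScan (board : List (List Int)) (height c : Nat) (i : Nat) : Nat :=
  if h : i < height then
    if (board.getD i []).getD c 0 = 0 then pvScan board height c (i + 1) else i
  else i
termination_by height - i
decreasing_by omega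

def solution_alt (board : List (List Int)) (moves : List Int) : Int :=
  let height := board.length
  let width : Nat := match board with | [] => 0 | r :: _ => r.length
  let fin := moves.foldl (fun (s : List Nat × List Int × Int) move =>
      let c := move - 1
      if 0 ≤ c ∧ c < (width : Int) then
        let i := pvScan board height c.toNat (s.1.getD c.toNat 0)
        if i = height then (s.1.set c.toNat i, s.2.1, s.2.2)
        else
          let item := (board.getD i []).getD c.toNat 0
          let pos' := s.1.set c.toNat (i + 1)
          if s.2.1.getLast? = some item then (pos', s.2.1.dropLast, s.2.2 + 2)
          else (pos', s.2.1 ++ [item], s.2.2)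
      else s) (List.replicate width 0, ([] : List Int), (0 : Int))
  fin.2.2

-- ===== PRECONDITION & SPEC =====
-- A indexes board[i][j] for every j < len(board[0]); it raises IndexError iff some row
-- is shorter than the first row. Pre_ excludes exactly those inputs.
def Pre_solution (board : List (List Int)) (moves : List Int) : Prop :=
  ∀ row ∈ board, (board.headD []).length ≤ row.length
instance (board : List (List Int)) (moves : List Int) : Decidable (Pre_solution board moves) := by
  unfold Pre_solution; infer_instance
def pvWitness_solution : List (List Int) × List Int := ([[0, 1], [2, 3]], [1, 1, 2, 2, 1])

def Spec_solution (board : List (List Int)) (moves : List Int) (out : Int) : Prop := out = solution_alt board moves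
instance (board : List (List Int)) (moves : List Int) (out : Int) : Decidable (Spec_solution board moves out) := by unfold Spec_solution; infer_instance

-- ===== CLAIM (what is proved, stated in full; the proofs are below) =====
def Claim_equal_solution : Prop := ∀ (board : List (List Int)) (moves : List Int), Dom_solution board moves → Pre_solution board moves → Spec_solution board moves (solution board moves)


-- ===== LEMMAS AND PROOFS =====

-- the inner (per-row) loop of A's build, as a named helper for the proofs
def pvInner (n : Int) (row : List Int) (tr : PySem.Dict Int (List Int)) : PySem.Dict Int (List Int) :=
  (PySem.List.pyRange 0 n 1).foldl (fun tr j =>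
    if PySem.List.pyGetD row j 0 = 0 then tr
    else tr.modify (j + 1) [] (· ++ [PySem.List.pyGetD row j 0])) tr

-- A's full dict build
def pvTrans (board : List (List Int)) : PySem.Dict Int (List Int) :=
  (PySem.List.pyRange ((board.length : Int) - 1) (-1) (-1)).foldl (fun tr i =>
    pvInner ((PySem.List.pyGetD board 0 []).length : Int) (PySem.List.pyGetD board i []) tr)
    PySem.Dict.empty

-- A's move step (let-free form of the fold body of `solution`)
def pvStepA (s : PySem.Dict Int (List Int) × List Int × Int) (move : Int) :
    PySem.Dict Int (List Int) × List Int × Int :=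
  match PySem.List.pop? (s.1.getD move []) (-1) with
  | none => s
  | some (item, rest) =>
    if s.2.1.getLast? = some item then (s.1.insert move rest, s.2.1.dropLast, s.2.2 + 2)
    else (s.1.insert move rest, s.2.1 ++ [item], s.2.2)

-- B's move step (let-free form of the fold body of `solution_alt`)
def pvStepB (board : List (List Int)) (width : Nat) (s : List Nat × List Int × Int) (m : Int) :
    List Nat × List Int × Int :=
  if 0 ≤ m - 1 ∧ m - 1 < (width : Int) then
    let i := pvScan board board.length (m - 1).toNat (s.1.getD (m - 1).toNat 0)
    if i = board.length then (s.1.set (m - 1).toNat i, s.2.1, s.2.2)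
    else
      let item := (board.getD i []).getD (m - 1).toNat 0
      if s.2.1.getLast? = some item then (s.1.set (m - 1).toNat (i + 1), s.2.1.dropLast, s.2.2 + 2)
      else (s.1.set (m - 1).toNat (i + 1), s.2.1 ++ [item], s.2.2)
  else s

-- the nonzero cells of column c from row r downward, top-to-bottom
def pvColRem (board : List (List Int)) (c : Nat) (r : Nat) : List Int :=
  ((board.drop r).map (fun row => row.getD c 0)).filter (fun v => v != 0)

lemma solution_eq (board : List (List Int)) (moves : List Int) :
    solution board moves = (moves.foldl pvStepA (pvTrans board, ([] : List Int), (0 : Int))).2.2 := rfl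

lemma solution_alt_eq (board : List (List Int)) (moves : List Int) :
    solution_alt board moves =
      (moves.foldl (pvStepB board (match board with | [] => 0 | r :: _ => r.length))
        (List.replicate (match board with | [] => 0 | r :: _ => r.length) 0,
          ([] : List Int), (0 : Int))).2.2 := rfl

lemma stepA_def (tr : PySem.Dict Int (List Int)) (basket : List Int) (removed : Int) (move : Int) :
    pvStepA (tr, basket, removed) move =
      match PySem.List.pop? (tr.getD move []) (-1) with
      | none => (tr, basket, removed)
      | some (item, rest) =>
        if basket.getLast? = some item then (tr.insert move rest, basket.dropLast, removed + 2)
        else (tr.insert move rest, basket ++ [item], removed) := rfl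

lemma inner_getD (row : List Int) (n : Nat) (c : Int) :
    ∀ tr : PySem.Dict Int (List Int),
    (pvInner (n : Int) row tr).getD c [] =
      tr.getD c [] ++ (if 1 ≤ c ∧ c ≤ (n : Int) ∧ PySem.List.pyGetD row (c - 1) 0 ≠ 0
        then [PySem.List.pyGetD row (c - 1) 0] else []) := by
  induction n with
  | zero =>
    intro tr
    rw [pvInner, show ((0 : Nat) : Int) = 0 from rfl, PySem.List.pyRange_one_eq_nil (le_refl 0),
      List.foldl_nil, if_neg (by omega), List.append_nil]
  | succ k ih =>
    intro tr
    rw [pvInner, show ((k + 1 : Nat) : Int) = (k : Int) + 1 by push_cast; ring,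
      PySem.List.pyRange_one_succ_right (by positivity), List.foldl_append, List.foldl_cons,
      List.foldl_nil, ← pvInner]
    by_cases hz : PySem.List.pyGetD row (k : Int) 0 = 0
    · rw [if_pos hz, ih]
      by_cases h : 1 ≤ c ∧ c ≤ (k : Int) ∧ PySem.List.pyGetD row (c - 1) 0 ≠ 0
      · rw [if_pos h, if_pos ⟨h.1, by omega, h.2.2⟩]
      · rw [if_neg h, if_neg ?_]
        intro h'
        rcases h' with ⟨h1, h2, h3⟩
        by_cases hck : c ≤ (k : Int)
        · exact h ⟨h1, hck, h3⟩
        · rw [show c - 1 = (k : Int) by omega] at h3; exact h3 hz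
    · rw [if_neg hz, PySem.Dict.getD_modify]
      by_cases hc : c = (k : Int) + 1
      · subst hc
        rw [if_pos rfl, ih, if_neg (by omega), List.append_nil,
          if_pos ⟨by omega, by omega, by rw [show (k : Int) + 1 - 1 = (k : Int) by ring]; exact hz⟩,
          show (k : Int) + 1 - 1 = (k : Int) by ring]
      · rw [if_neg hc, ih]
        by_cases h : 1 ≤ c ∧ c ≤ (k : Int) ∧ PySem.List.pyGetD row (c - 1) 0 ≠ 0
        · rw [if_pos h, if_pos ⟨h.1, by omega, h.2.2⟩]
        · rw [if_neg h, if_neg (by intro h'; exact h ⟨h'.1, by omega, h'.2.2⟩)]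

lemma outer_getD (rows : List (List Int)) (n : Nat) (c : Int) :
    ∀ tr : PySem.Dict Int (List Int),
    ((rows.foldl (fun tr row => pvInner (n : Int) row tr) tr).getD c []) =
      tr.getD c [] ++ (if 1 ≤ c ∧ c ≤ (n : Int)
        then (rows.map (fun row => PySem.List.pyGetD row (c - 1) 0)).filter (fun v => v != 0)
        else []) := by
  induction rows with
  | nil => intro tr; simp
  | cons r rest ih =>
    intro tr
    rw [List.foldl_cons, ih, inner_getD, List.map_cons, List.filter_cons]
    by_cases h : 1 ≤ c ∧ c ≤ (n : Int)
    · by_cases hz : PySem.List.pyGetD r (c - 1) 0 = 0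
      · rw [if_neg (by simp [hz]), if_pos h, if_pos h, if_neg (by simp [hz]), List.append_nil]
      · rw [if_pos ⟨h.1, h.2, hz⟩, if_pos h, if_pos h, if_pos (by simp [hz]),
          List.append_assoc, List.singleton_append]
    · rw [if_neg (by omega), if_neg h, if_neg h, List.append_nil]

lemma foldl_rows (I : List Int) (board : List (List Int)) (n : Int)
    (tr : PySem.Dict Int (List Int)) :
    I.foldl (fun tr i => pvInner n (PySem.List.pyGetD board i []) tr) tr =
      (I.map (fun i => PySem.List.pyGetD board i [])).foldl (fun tr row => pvInner n row tr) tr := by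
  induction I generalizing tr with
  | nil => rfl
  | cons i I ih => rw [List.foldl_cons, List.map_cons, List.foldl_cons, ih]

lemma trans_getD (board : List (List Int)) (c : Int) :
    (pvTrans board).getD c [] =
      if 1 ≤ c ∧ c ≤ ((PySem.List.pyGetD board 0 []).length : Int)
      then (((board.map (fun row => PySem.List.pyGetD row (c - 1) 0)).filter (fun v => v != 0)).reverse)
      else [] := by
  rw [pvTrans, PySem.List.pyRange_neg_one_eq_reverse,
    show (-1 : Int) + 1 = 0 by ring, show (board.length : Int) - 1 + 1 = (board.length : Int) by ring,
    foldl_rows, List.map_reverse, PySem.List.map_pyGetD_pyRange_zero',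
    outer_getD board.reverse (PySem.List.pyGetD board 0 []).length c PySem.Dict.empty,
    PySem.Dict.getD_empty, List.nil_append, List.map_reverse, List.filter_reverse]

lemma pyGetD_zero_headD (board : List (List Int)) :
    PySem.List.pyGetD board 0 [] = board.headD [] := by
  rw [PySem.List.pyGetD_zero]; cases board <;> simp

lemma colRem_of_ge (board : List (List Int)) (c r : Nat) (h : board.length ≤ r) :
    pvColRem board c r = [] := by
  rw [pvColRem, List.drop_eq_nil_of_le h]; rfl

lemma colRem_step (board : List (List Int)) (c r : Nat) (h : r < board.length) :
    pvColRem board c r =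
      (if (board.getD r []).getD c 0 != 0 then [(board.getD r []).getD c 0] else []) ++
        pvColRem board c (r + 1) := by
  have hbr : board.getD r [] = board[r] := by
    rw [List.getD_eq_getElem?_getD, List.getElem?_eq_getElem h, Option.getD_some]
  rw [pvColRem, pvColRem, List.drop_eq_getElem_cons h, List.map_cons, List.filter_cons, hbr]
  split_ifs <;> simp [List.getD]

-- the scan finds the first nonzero cell at or below row i, preserving the column remainder
lemma scan_spec (board : List (List Int)) (c : Nat) :
    ∀ n i, board.length - i = n → i ≤ board.length →
      i ≤ pvScan board board.length c i ∧ pvScan board board.length c i ≤ board.length ∧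
      pvColRem board c i = pvColRem board c (pvScan board board.length c i) ∧
      (pvScan board board.length c i < board.length →
        (board.getD (pvScan board board.length c i) []).getD c 0 ≠ 0) := by
  intro n
  induction n with
  | zero =>
    intro i hn hi
    have hieq : i = board.length := by omega
    rw [pvScan, dif_neg (by omega)]
    exact ⟨le_refl _, by omega, rfl, by omega⟩
  | succ k ih =>
    intro i hn hi
    have hlt : i < board.length := by omega
    rw [pvScan, dif_pos hlt]
    by_cases hz : (board.getD i []).getD c 0 = 0
    · rw [if_pos hz]
      obtain ⟨h1, h2, h3, h4⟩ := ih (i + 1) (by omega) (by omega)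
      refine ⟨by omega, h2, ?_, h4⟩
      rw [colRem_step board c i hlt, if_neg (by rw [hz]; decide), List.nil_append, h3]
    · rw [if_neg hz]
      exact ⟨le_refl _, by omega, rfl, fun _ => hz⟩

-- main loop invariant: A's remaining dict mirrors B's pointer array
lemma loop_eq (board : List (List Int)) (width : Nat) (moves : List Int) :
    ∀ (tr : PySem.Dict Int (List Int)) (pos : List Nat) (basket : List Int) (removed : Int),
    pos.length = width →
    (∀ k ∈ pos, k ≤ board.length) →
    (∀ m : Int, tr.getD m [] =
      if 1 ≤ m ∧ m ≤ (width : Int)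
      then (pvColRem board (m - 1).toNat (pos.getD (m - 1).toNat 0)).reverse else []) →
    (moves.foldl pvStepA (tr, basket, removed)).2.2 =
      (moves.foldl (pvStepB board width) (pos, basket, removed)).2.2 := by
  induction moves with
  | nil => intro tr pos basket removed _ _ _; rfl
  | cons m ms ih =>
    intro tr pos basket removed hlen hbd hrel
    rw [List.foldl_cons, List.foldl_cons]
    by_cases hin : 1 ≤ m ∧ m ≤ (width : Int)
    · have hc : (m - 1).toNat < pos.length := by omega
      set c := (m - 1).toNat with hcdef
      have hi0 : pos.getD c 0 ≤ board.length := by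
        apply hbd
        rw [List.getD_eq_getElem?_getD, List.getElem?_eq_getElem hc, Option.getD_some]
        exact List.getElem_mem hc
      obtain ⟨hji, hjle, hcol, hnz⟩ :=
        scan_spec board c (board.length - pos.getD c 0) (pos.getD c 0) rfl hi0
      set j := pvScan board board.length c (pos.getD c 0) with hjdef
      have hBguard : (0 ≤ m - 1 ∧ m - 1 < (width : Int)) := by constructor <;> omega
      have hposlen : ∀ v : Nat, (pos.set c v).length = width := by
        intro v; rw [List.length_set]; exact hlen
      have hposbd : ∀ v : Nat, v ≤ board.length → ∀ k ∈ pos.set c v, k ≤ board.length := by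
        intro v hv k hk
        rcases List.mem_or_eq_of_mem_set hk with h | h
        · exact hbd k h
        · omega
      have hgetset : ∀ v : Nat, (pos.set c v).getD c 0 = v := by
        intro v
        rw [List.getD_eq_getElem?_getD, List.getElem?_set_self (by omega), Option.getD_some]
      have hgetset_ne : ∀ (v : Nat) (m' : Int), m' ≠ m → 1 ≤ m' →
          (pos.set c v).getD (m' - 1).toNat 0 = pos.getD (m' - 1).toNat 0 := by
        intro v m' hne h1
        rw [List.getD_eq_getElem?_getD, List.getD_eq_getElem?_getD,
          List.getElem?_set_ne (by omega)]
      by_cases hend : j = board.length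
      · -- column exhausted: A pops nothing, B only advances the pointer
        have hAe : tr.getD m [] = [] := by
          rw [hrel m, if_pos hin]
          show (pvColRem board c (pos.getD c 0)).reverse = []
          rw [hcol, hend, colRem_of_ge board c board.length (le_refl _), List.reverse_nil]
        have hA : pvStepA (tr, basket, removed) m = (tr, basket, removed) := by
          rw [stepA_def, hAe]; rfl
        have hB : pvStepB board width (pos, basket, removed) m =
            (pos.set c j, basket, removed) := by
          rw [pvStepB, if_pos hBguard]
          simp only [← hcdef, ← hjdef, if_pos hend]
        rw [hA, hB]
        refine ih tr (pos.set c j) basket removed (hposlen j) (hposbd j hjle) ?_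
        intro m'
        rw [hrel m']
        by_cases h' : 1 ≤ m' ∧ m' ≤ (width : Int)
        · rw [if_pos h', if_pos h']
          by_cases hm' : m' = m
          · subst hm'
            show (pvColRem board c (pos.getD c 0)).reverse =
              (pvColRem board c ((pos.set c j).getD c 0)).reverse
            rw [hgetset, hcol]
          · rw [hgetset_ne j m' hm' h'.1]
        · rw [if_neg h', if_neg h']
      · -- item found at row j
        have hjlt : j < board.length := by omega
        set item := (board.getD j []).getD c 0 with hitem
        have hitemnz : item ≠ 0 := hnz hjlt
        have hsplit : pvColRem board c (pos.getD c 0) = item :: pvColRem board c (j + 1) := by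
          rw [hcol, colRem_step board c j hjlt, if_pos (by simpa using hitemnz), ← hitem,
            List.singleton_append]
        have hrow : tr.getD m [] = (pvColRem board c (j + 1)).reverse ++ [item] := by
          rw [hrel m, if_pos hin, ← hcdef, hsplit, List.reverse_cons]
        have hA : pvStepA (tr, basket, removed) m =
            (tr.insert m (pvColRem board c (j + 1)).reverse,
              if basket.getLast? = some item then (basket.dropLast, removed + 2)
              else (basket ++ [item], removed)) := by
          rw [stepA_def, hrow, PySem.List.pop?_last]
          by_cases hb : basket.getLast? = some item
          · simp [hb]
          · simp [hb]
        have hB : pvStepB board width (pos, basket, removed) m =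
            (pos.set c (j + 1),
              if basket.getLast? = some item then (basket.dropLast, removed + 2)
              else (basket ++ [item], removed)) := by
          rw [pvStepB, if_pos hBguard]
          simp only [← hcdef, ← hjdef, if_neg hend, ← hitem]
          by_cases hb : basket.getLast? = some item
          · simp [hb]
          · simp [hb]
        have hrel' : ∀ m' : Int,
            (tr.insert m (pvColRem board c (j + 1)).reverse).getD m' [] =
            if 1 ≤ m' ∧ m' ≤ (width : Int)
            then (pvColRem board (m' - 1).toNat ((pos.set c (j + 1)).getD (m' - 1).toNat 0)).reverse
            else [] := by
          intro m'
          rw [PySem.Dict.getD_insert]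
          by_cases hm' : m' = m
          · subst hm'
            rw [if_pos rfl, if_pos hin, ← hcdef, hgetset]
          · rw [if_neg hm', hrel m']
            by_cases h' : 1 ≤ m' ∧ m' ≤ (width : Int)
            · rw [if_pos h', if_pos h', hgetset_ne (j + 1) m' hm' h'.1]
            · rw [if_neg h', if_neg h']
        rw [hA, hB]
        by_cases hb : basket.getLast? = some item
        · rw [if_pos hb]
          exact ih _ _ basket.dropLast (removed + 2) (hposlen (j + 1))
            (hposbd (j + 1) (by omega)) hrel'
        · rw [if_neg hb]
          exact ih _ _ (basket ++ [item]) removed (hposlen (j + 1))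
            (hposbd (j + 1) (by omega)) hrel'
    · have hA : pvStepA (tr, basket, removed) m = (tr, basket, removed) := by
        rw [stepA_def, show tr.getD m [] = [] by rw [hrel m, if_neg hin]]
        rfl
      have hB : pvStepB board width (pos, basket, removed) m = (pos, basket, removed) := by
        rw [pvStepB, if_neg (by omega)]
      rw [hA, hB]; exact ih tr pos basket removed hlen hbd hrel

-- ===== VERDICT (by name: the statement is the Claim_ definition above) =====
theorem solution_spec : Claim_equal_solution := by
  intro board moves _ _
  unfold Spec_solution
  rw [solution_eq, solution_alt_eq]
  have hw : ∀ l : List (List Int),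
      (match l with | [] => (0 : Nat) | r :: _ => r.length) = (l.headD []).length := by
    intro l; cases l <;> simp
  rw [hw board]
  refine loop_eq board (board.headD []).length moves (pvTrans board)
    (List.replicate (board.headD []).length 0) [] 0 List.length_replicate ?_ ?_
  · intro k hk; rw [List.eq_of_mem_replicate hk]; omega
  · intro m
    rw [trans_getD, pyGetD_zero_headD]
    by_cases h : 1 ≤ m ∧ m ≤ (((board.headD []).length : Nat) : Int)
    · rw [if_pos h, if_pos h,
        show (List.replicate (board.headD []).length (0 : Nat)).getD (m - 1).toNat 0 = 0 by
          rw [List.getD_eq_getElem?_getD, List.getElem?_replicate]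
          split_ifs <;> rfl,
        pvColRem, List.drop_zero,
        show (board.map (fun row => PySem.List.pyGetD row (m - 1) 0)) =
            board.map (fun row => row.getD (m - 1).toNat 0) from
          List.map_congr_left (fun row _ => PySem.List.pyGetD_of_nonneg row 0 (by omega))]
    · rw [if_neg h, if_neg h]
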